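-- pv_equiv track=rewrite | github.com/MrBrantCode/unitest_baseline | mut_generate/mist_train_cf/cf_60183/solution.py | manipulate_strings
-- ===== SOURCE A (Python) =====
-- def manipulate_strings(input_list):
--     result = []
--     for s in input_list:
--         if len(s) > 1:
--             result.append(s[-1].upper() + s[1:-1][::-1] + s[0].upper())
--         elif s:
--             result.append(s.upper())
--         else:
--             result.append(s)
--     return result
-- ===== SOURCE B (Python) =====
-- def manipulate_strings(input_list):
--     out = []
--     for s in input_list:
--         last = len(s) - 1
--         chars = [c.upper() if i == 0 or i == last else c for i, c in enumerate(s)]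
--         chars.reverse()
--         out.append(''.join(chars))
--     return out
-- ===== Notes on version B (the rewrite author's own statement) =====
-- stated objective: alternative
-- what changed: B is branch-free and slice-free: a single positional pass uppercases each character exactly when its index is a boundary index (0 or len-1), then reverses the character list and joins, instead of A's three-way length branching with end-character swapping and a middle-slice reversal; a length-1 string has index 0 = last, so it is uppercased once, and an empty string yields an empty join, which is why no branches are needed.
import Mathlib
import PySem

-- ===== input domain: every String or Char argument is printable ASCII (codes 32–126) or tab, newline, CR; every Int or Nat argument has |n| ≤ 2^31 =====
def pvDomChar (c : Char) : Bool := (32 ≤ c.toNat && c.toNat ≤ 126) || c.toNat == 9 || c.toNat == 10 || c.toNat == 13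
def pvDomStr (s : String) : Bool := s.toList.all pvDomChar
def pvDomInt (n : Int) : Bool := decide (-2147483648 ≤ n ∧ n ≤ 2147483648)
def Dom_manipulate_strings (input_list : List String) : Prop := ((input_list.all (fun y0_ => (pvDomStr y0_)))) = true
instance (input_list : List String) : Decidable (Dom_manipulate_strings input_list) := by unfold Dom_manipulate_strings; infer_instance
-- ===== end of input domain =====

-- B is branch-free: one positional pass uppercases a character exactly when its index is 0 or
-- len-1, then the character list is reversed and joined (no slicing, no length branching);
-- objective: alternative.

-- ===== PORT A =====
-- s[i].upper() for a single char (pyGet? returns the char; the length guard makes 'none' unreachable)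
def pvChr1U (c? : Option Char) : String :=
  match c? with
  | some c => PySem.Str.upper (String.ofList [c])
  | none => ""

def manipulate_strings (input_list : List String) : List String :=
  input_list.foldl (fun result s =>
    result ++ [
      if 1 < PySem.Str.len s then
        -- s[-1].upper() + s[1:-1][::-1] + s[0].upper()
        PySem.Str.join "" [pvChr1U (PySem.Str.pyGet? s (-1)),
          (PySem.Str.slice? (PySem.Str.slice s (some 1) (some (-1))) none none (-1)).getD "",
          pvChr1U (PySem.Str.pyGet? s 0)]
      else if s ≠ "" then PySem.Str.upper s
      else s ]) []

-- ===== PORT B =====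
-- one string of Source B's loop body: enumerate, positional uppercasing, reverse, join
def pvBStep (s : String) : String :=
  let last : Int := PySem.Str.len s - 1
  let chars : List String :=
    (PySem.List.enumerate s.toList 0).map (fun p =>
      if p.1 == 0 || p.1 == last then PySem.Str.upper (String.ofList [p.2])
      else String.ofList [p.2])
  PySem.Str.join "" chars.reverse

def manipulate_strings_alt (input_list : List String) : List String :=
  input_list.foldl (fun out s => out ++ [pvBStep s]) []

-- ===== PRECONDITION & SPEC =====
def Spec_manipulate_strings (input_list : List String) (out : List String) : Prop := out = manipulate_strings_alt input_list
instance (input_list : List String) (out : List String) : Decidable (Spec_manipulate_strings input_list out) := by unfold Spec_manipulate_strings; infer_instance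

-- ===== CLAIM (what is proved, stated in full; the proofs are below) =====
def Claim_equal_manipulate_strings : Prop := ∀ (input_list : List String), Dom_manipulate_strings input_list → Spec_manipulate_strings input_list (manipulate_strings input_list)

-- ===== LEMMAS AND PROOFS =====

theorem pv_getLast_cons_concat (a b : Char) (ms : List Char) :
    (a :: (ms ++ [b])).getLast? = some b := by
  rw [← List.cons_append]; exact List.getLast?_concat

-- B's per-string value on a string of length ≥ 2
theorem pvBStep_long (a b : Char) (ms : List Char) :
    pvBStep (String.ofList (a :: (ms ++ [b]))) =
      String.ofList (PySem.Chars.upperChar b :: ms.reverse ++ [PySem.Chars.upperChar a]) := by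
  unfold pvBStep
  simp only []
  have hlast : (PySem.Str.len (String.ofList (a :: (ms ++ [b]))) - 1 : Int) = (ms.length : Int) + 1 := by
    simp [PySem.Str.len_eq]
  rw [hlast]
  have henum : PySem.List.enumerate (String.ofList (a :: (ms ++ [b]))).toList 0
      = (0, a) :: (PySem.List.enumerate ms 1 ++ [((1 : Int) + ms.length, b)]) := by
    simp [PySem.List.enumerate_cons, PySem.List.enumerate_append, PySem.List.enumerate_nil]
  rw [henum]
  have hmid : (PySem.List.enumerate ms 1).map (fun p : Int × Char =>
      if p.1 == 0 || p.1 == ((ms.length : Int) + 1) then PySem.Str.upper (String.ofList [p.2])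
      else String.ofList [p.2]) = ms.map (fun c => String.ofList [c]) := by
    rw [show ms.map (fun c => String.ofList [c])
        = (PySem.List.enumerate ms 1).map (fun p : Int × Char => String.ofList [p.2]) by
      have h := congrArg (List.map (fun c => String.ofList [c])) (PySem.List.map_snd_enumerate ms 1)
      rw [List.map_map] at h
      exact h.symm]
    apply List.map_congr_left
    intro p hp
    rcases (PySem.List.mem_enumerate_iff ms 1 p).mp hp with ⟨k, hk, rfl⟩
    have h1 : ((1 + (k : Int)) == 0 || (1 + (k : Int)) == ((ms.length : Int) + 1)) = false := by
      simp only [Bool.or_eq_false_iff, beq_eq_false_iff_ne, ne_eq]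
      constructor <;> omega
    simp [h1]
  simp only [List.map_cons, List.map_append, hmid, List.map_nil]
  have h0 : (((0 : Int) == 0 || (0 : Int) == ((ms.length : Int) + 1))) = true := by simp
  have hb : (((1 + (ms.length : Int)) == 0 || (1 + (ms.length : Int)) == ((ms.length : Int) + 1))) = true := by
    simp only [Bool.or_eq_true, beq_iff_eq]
    omega
  rw [if_pos h0, if_pos hb]
  apply String.toList_inj.mp
  simp only [List.reverse_cons, List.reverse_append, List.reverse_nil, List.nil_append,
    List.map_reverse, PySem.Str.toList_join, List.map_map, List.map_cons, List.map_append]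
  simp [PySem.Chars.upper]
  have hc : (String.toList ∘ fun c : Char => String.ofList [c]) = fun c : Char => [c] := by
    funext c; simp
  rw [hc]
  rw [show ([PySem.Chars.upperChar b] :: ((List.map (fun c : Char => [c]) ms).reverse ++ [[PySem.Chars.upperChar a]]))
      = (PySem.Chars.upperChar b :: (ms.reverse ++ [PySem.Chars.upperChar a])).map (fun c : Char => [c]) by
    simp [List.map_reverse]]
  exact PySem.Chars.join_nil_singletons _

-- A's loop body equals B's loop body on every string
theorem pv_step_eq (s : String) :
    (if 1 < PySem.Str.len s then
        PySem.Str.join "" [pvChr1U (PySem.Str.pyGet? s (-1)),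
          (PySem.Str.slice? (PySem.Str.slice s (some 1) (some (-1))) none none (-1)).getD "",
          pvChr1U (PySem.Str.pyGet? s 0)]
      else if s ≠ "" then PySem.Str.upper s
      else s) = pvBStep s := by
  obtain ⟨cs, rfl⟩ : ∃ cs : List Char, s = String.ofList cs :=
    ⟨s.toList, String.ofList_toList.symm⟩
  by_cases h : 1 < PySem.Str.len (String.ofList cs)
  · -- long strings: decompose cs = a :: ms ++ [b]
    have hlen : 2 ≤ cs.length := by
      simpa [PySem.Str.len_eq] using h
    rcases cs with _ | ⟨a, rest⟩
    · simp at hlen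
    rcases List.eq_nil_or_concat rest with rfl | ⟨ms, b, rfl⟩
    · simp at hlen
    rw [List.concat_eq_append] at *
    rw [if_pos h, pvBStep_long]
    apply String.toList_inj.mp
    simp [pvChr1U, PySem.List.pyGet?_neg_one, pv_getLast_cons_concat,
      PySem.Str.slice?_none_none_neg_one, PySem.List.slice, PySem.Chars.upper]
    rw [PySem.Chars.join_cons_cons, PySem.Chars.join_cons_cons, PySem.Chars.join_singleton]
    simp
  · -- short strings
    rw [if_neg h]
    rcases cs with _ | ⟨a, rest⟩
    · -- empty string: both sides are s itself
      have h0 : String.ofList ([] : List Char) = "" := String.toList_inj.mp (by simp)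
      rw [h0, if_neg (by simp)]
      apply String.toList_inj.mp
      simp [pvBStep, PySem.List.enumerate_nil, PySem.Chars.join_nil]
    · have hr : rest = [] := by
        rcases rest with _ | ⟨c, rs⟩
        · rfl
        · exfalso; simp [PySem.Str.len_eq] at h
      subst hr
      rw [if_pos (by
        intro hc
        have := congrArg String.toList hc
        simp at this)]
      apply String.toList_inj.mp
      simp [pvBStep, PySem.List.enumerate_cons, PySem.List.enumerate_nil,
        PySem.Chars.join_singleton, PySem.Chars.upper]

-- ===== VERDICT (by name: the statement is the Claim_ definition above) =====
theorem manipulate_strings_spec : Claim_equal_manipulate_strings := by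
  intro input_list _
  show _ = _
  unfold manipulate_strings manipulate_strings_alt
  congr 1
  funext result s
  rw [pv_step_eq]
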